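-- pv_equiv track=rewrite | github.com/jsk04/log-analyzer-fabric | app.py | calculate_review_counts
-- ===== SOURCE A (Python) =====
-- def is_reviewed(log):
--     return any([
--         log.get('is_independent_question'),
--         log.get('response_review'),
--         log.get('query_review'),
--         log.get('urls_review'),
--         log.get('last_updated_at')
--     ])
--
-- def cnt(reviewed_logs, field, val):
--     return sum(1 for l in reviewed_logs if l.get(field) == val)
--
-- def calculate_review_counts(logs):
--     total = len(logs)
--     reviewed_logs = [l for l in logs if is_reviewed(l)]
--     not_reviewed_logs = [l for l in logs if not is_reviewed(l)]
--     indep_yes = sum(1 for l in reviewed_logs if l['is_independent_question'] == "Yes")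
--     indep_no = sum(1 for l in reviewed_logs if l['is_independent_question'] == "No")
--
--     return {
--         "total": total,
--         "reviewed": len(reviewed_logs),
--         "not_reviewed": len(not_reviewed_logs),
--         "indep_yes": indep_yes,
--         "indep_no": indep_no,
--         "resp_correct": cnt(reviewed_logs, "response_review", "Correct"),
--         "resp_partially": cnt(reviewed_logs, "response_review", "Partially"),
--         "resp_incorrect": cnt(reviewed_logs, "response_review", "Incorrect"),
--         "resp_idk": cnt(reviewed_logs, "response_review", "I Don't Know"),
--         "query_good": cnt(reviewed_logs, "query_review", "Good"),
--         "query_acceptable": cnt(reviewed_logs, "query_review", "Acceptable"),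
--         "query_bad": cnt(reviewed_logs, "query_review", "Bad"),
--         "query_idk": cnt(reviewed_logs, "query_review", "I Don't Know"),
--         "urls_good": cnt(reviewed_logs, "urls_review", "Good"),
--         "urls_acceptable": cnt(reviewed_logs, "urls_review", "Acceptable"),
--         "urls_bad": cnt(reviewed_logs, "urls_review", "Bad"),
--         "urls_idk": cnt(reviewed_logs, "urls_review", "I Don't Know")
--     }
-- ===== SOURCE B (Python) =====
-- def calculate_review_counts(logs):
--     # One pass: tally each review field into a dict instead of re-scanning the list 20 times.
--     reviewed = 0
--     resp = {}
--     query = {}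
--     urls = {}
--     indep = {}
--     for l in logs:
--         if (l.get('is_independent_question') or l.get('response_review')
--                 or l.get('query_review') or l.get('urls_review')
--                 or l.get('last_updated_at')):
--             reviewed += 1
--             v = l.get('response_review')
--             resp[v] = resp.get(v, 0) + 1
--             v = l.get('query_review')
--             query[v] = query.get(v, 0) + 1
--             v = l.get('urls_review')
--             urls[v] = urls.get(v, 0) + 1
--             v = l['is_independent_question']
--             indep[v] = indep.get(v, 0) + 1
--     total = len(logs)
--     return {
--         "total": total,
--         "reviewed": reviewed,
--         "not_reviewed": total - reviewed,
--         "indep_yes": indep.get("Yes", 0),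
--         "indep_no": indep.get("No", 0),
--         "resp_correct": resp.get("Correct", 0),
--         "resp_partially": resp.get("Partially", 0),
--         "resp_incorrect": resp.get("Incorrect", 0),
--         "resp_idk": resp.get("I Don't Know", 0),
--         "query_good": query.get("Good", 0),
--         "query_acceptable": query.get("Acceptable", 0),
--         "query_bad": query.get("Bad", 0),
--         "query_idk": query.get("I Don't Know", 0),
--         "urls_good": urls.get("Good", 0),
--         "urls_acceptable": urls.get("Acceptable", 0),
--         "urls_bad": urls.get("Bad", 0),
--         "urls_idk": urls.get("I Don't Know", 0),
--     }
-- ===== Notes on version B (the rewrite author's own statement) =====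
-- stated objective: idiomatic
-- what changed: Replaces A's two filter passes plus 20 separate full scans (len/sum/cnt per field value) with a single pass that tallies each review field into a dict and then reads the 17 counts out of the tables.
import Mathlib
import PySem

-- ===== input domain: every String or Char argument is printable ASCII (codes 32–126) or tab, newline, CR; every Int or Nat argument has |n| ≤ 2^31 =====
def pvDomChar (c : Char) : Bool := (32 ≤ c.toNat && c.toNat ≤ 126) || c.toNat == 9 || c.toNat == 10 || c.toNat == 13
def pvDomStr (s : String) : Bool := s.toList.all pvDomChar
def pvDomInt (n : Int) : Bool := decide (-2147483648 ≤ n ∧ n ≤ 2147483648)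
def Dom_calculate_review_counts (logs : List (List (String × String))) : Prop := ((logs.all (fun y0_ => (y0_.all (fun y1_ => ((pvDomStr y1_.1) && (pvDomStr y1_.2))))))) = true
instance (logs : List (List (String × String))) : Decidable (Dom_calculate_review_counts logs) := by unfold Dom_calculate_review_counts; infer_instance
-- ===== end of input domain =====

-- B replaces A's two filter passes and 20 separate scans by one pass tallying each review field into a dict.

-- ===== PORT A =====
-- log.get(k): the log dict is an association list; Dict.ofList rebuilds Python's dict (later duplicates overwrite)
def pvGet (log : List (String × String)) (k : String) : Option String :=
  (PySem.Dict.ofList log).get? k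

-- Python truthiness of an Optional[str]: None and "" are falsy
def pvTruthy (o : Option String) : Bool :=
  match o with
  | some v => !v.toList.isEmpty
  | none => false

def pvIsReviewed (log : List (String × String)) : Bool :=
  ([pvGet log "is_independent_question", pvGet log "response_review",
    pvGet log "query_review", pvGet log "urls_review",
    pvGet log "last_updated_at"]).any pvTruthy

def pvCnt (reviewed_logs : List (List (String × String))) (field val : String) : Int :=
  (reviewed_logs.map (fun l => if pvGet l field == some val then (1 : Int) else 0)).sum

def calculate_review_counts (logs : List (List (String × String))) : List (String × Int) :=
  let total : Int := logs.length
  let reviewed_logs := logs.filter pvIsReviewed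
  let not_reviewed_logs := logs.filter (fun l => !pvIsReviewed l)
  -- l['is_independent_question'] raises KeyError when absent; Pre_ guarantees presence, getD "" never fires
  let indep_yes : Int :=
    (reviewed_logs.map (fun l => if (pvGet l "is_independent_question").getD "" == "Yes" then (1 : Int) else 0)).sum
  let indep_no : Int :=
    (reviewed_logs.map (fun l => if (pvGet l "is_independent_question").getD "" == "No" then (1 : Int) else 0)).sum
  [("total", total),
   ("reviewed", (reviewed_logs.length : Int)),
   ("not_reviewed", (not_reviewed_logs.length : Int)),
   ("indep_yes", indep_yes),
   ("indep_no", indep_no),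
   ("resp_correct", pvCnt reviewed_logs "response_review" "Correct"),
   ("resp_partially", pvCnt reviewed_logs "response_review" "Partially"),
   ("resp_incorrect", pvCnt reviewed_logs "response_review" "Incorrect"),
   ("resp_idk", pvCnt reviewed_logs "response_review" "I Don't Know"),
   ("query_good", pvCnt reviewed_logs "query_review" "Good"),
   ("query_acceptable", pvCnt reviewed_logs "query_review" "Acceptable"),
   ("query_bad", pvCnt reviewed_logs "query_review" "Bad"),
   ("query_idk", pvCnt reviewed_logs "query_review" "I Don't Know"),
   ("urls_good", pvCnt reviewed_logs "urls_review" "Good"),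
   ("urls_acceptable", pvCnt reviewed_logs "urls_review" "Acceptable"),
   ("urls_bad", pvCnt reviewed_logs "urls_review" "Bad"),
   ("urls_idk", pvCnt reviewed_logs "urls_review" "I Don't Know")]

-- ===== PORT B =====
-- d[v] = d.get(v, 0) + 1
def pvBump (d : PySem.Dict (Option String) Int) (v : Option String) : PySem.Dict (Option String) Int :=
  d.insert v (d.getD v 0 + 1)

def pvBumpS (d : PySem.Dict String Int) (v : String) : PySem.Dict String Int :=
  d.insert v (d.getD v 0 + 1)

-- one iteration of B's single loop; state = (reviewed, resp, query, urls, indep)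
def pvStep
    (st : Int × PySem.Dict (Option String) Int × PySem.Dict (Option String) Int ×
          PySem.Dict (Option String) Int × PySem.Dict String Int)
    (l : List (String × String)) :
    Int × PySem.Dict (Option String) Int × PySem.Dict (Option String) Int ×
    PySem.Dict (Option String) Int × PySem.Dict String Int :=
  if pvTruthy (pvGet l "is_independent_question") || pvTruthy (pvGet l "response_review")
      || pvTruthy (pvGet l "query_review") || pvTruthy (pvGet l "urls_review")
      || pvTruthy (pvGet l "last_updated_at") then
    (st.1 + 1,
     pvBump st.2.1 (pvGet l "response_review"),
     pvBump st.2.2.1 (pvGet l "query_review"),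
     pvBump st.2.2.2.1 (pvGet l "urls_review"),
     -- l['is_independent_question'] raises KeyError when absent; Pre_ guarantees presence
     pvBumpS st.2.2.2.2 ((pvGet l "is_independent_question").getD ""))
  else st

def calculate_review_counts_alt (logs : List (List (String × String))) : List (String × Int) :=
  let st := logs.foldl pvStep
    (0, PySem.Dict.empty, PySem.Dict.empty, PySem.Dict.empty, PySem.Dict.empty)
  let total : Int := logs.length
  [("total", total),
   ("reviewed", st.1),
   ("not_reviewed", total - st.1),
   ("indep_yes", st.2.2.2.2.getD "Yes" 0),
   ("indep_no", st.2.2.2.2.getD "No" 0),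
   ("resp_correct", st.2.1.getD (some "Correct") 0),
   ("resp_partially", st.2.1.getD (some "Partially") 0),
   ("resp_incorrect", st.2.1.getD (some "Incorrect") 0),
   ("resp_idk", st.2.1.getD (some "I Don't Know") 0),
   ("query_good", st.2.2.1.getD (some "Good") 0),
   ("query_acceptable", st.2.2.1.getD (some "Acceptable") 0),
   ("query_bad", st.2.2.1.getD (some "Bad") 0),
   ("query_idk", st.2.2.1.getD (some "I Don't Know") 0),
   ("urls_good", st.2.2.2.1.getD (some "Good") 0),
   ("urls_acceptable", st.2.2.2.1.getD (some "Acceptable") 0),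
   ("urls_bad", st.2.2.2.1.getD (some "Bad") 0),
   ("urls_idk", st.2.2.2.1.getD (some "I Don't Know") 0)]

-- ===== PRECONDITION & SPEC =====
-- Pre_ excludes exactly the inputs where Python A raises KeyError: a reviewed log without 'is_independent_question'
def Pre_calculate_review_counts (logs : List (List (String × String))) : Prop :=
  ∀ l ∈ logs, pvIsReviewed l = true →
    (PySem.Dict.ofList l).contains "is_independent_question" = true
instance (logs : List (List (String × String))) : Decidable (Pre_calculate_review_counts logs) := by
  unfold Pre_calculate_review_counts; infer_instance

def pvWitness_calculate_review_counts : (List (List (String × String))) :=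
  [[("is_independent_question", "Yes"), ("response_review", "Correct")], [("x", "y")]]

def Spec_calculate_review_counts (logs : List (List (String × String))) (out : List (String × Int)) : Prop := out = calculate_review_counts_alt logs
instance (logs : List (List (String × String))) (out : List (String × Int)) : Decidable (Spec_calculate_review_counts logs out) := by unfold Spec_calculate_review_counts; infer_instance

-- ===== CLAIM (what is proved, stated in full; the proofs are below) =====
def Claim_equal_calculate_review_counts : Prop := ∀ (logs : List (List (String × String))), Dom_calculate_review_counts logs → Pre_calculate_review_counts logs → Spec_calculate_review_counts logs (calculate_review_counts logs)

-- ===== LEMMAS AND PROOFS =====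

-- B's loop condition is A's is_reviewed
lemma pvCond_eq (l : List (String × String)) :
    (pvTruthy (pvGet l "is_independent_question") || pvTruthy (pvGet l "response_review")
      || pvTruthy (pvGet l "query_review") || pvTruthy (pvGet l "urls_review")
      || pvTruthy (pvGet l "last_updated_at")) = pvIsReviewed l := by
  simp [pvIsReviewed, Bool.or_assoc]

-- closed form of B's single-pass fold state
lemma foldl_pvStep (logs : List (List (String × String)))
    (st : Int × PySem.Dict (Option String) Int × PySem.Dict (Option String) Int ×
          PySem.Dict (Option String) Int × PySem.Dict String Int) :
    logs.foldl pvStep st =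
      (st.1 + ((logs.filter pvIsReviewed).length : Int),
       ((logs.filter pvIsReviewed).map (fun l => pvGet l "response_review")).foldl pvBump st.2.1,
       ((logs.filter pvIsReviewed).map (fun l => pvGet l "query_review")).foldl pvBump st.2.2.1,
       ((logs.filter pvIsReviewed).map (fun l => pvGet l "urls_review")).foldl pvBump st.2.2.2.1,
       ((logs.filter pvIsReviewed).map (fun l => (pvGet l "is_independent_question").getD "")).foldl pvBumpS st.2.2.2.2) := by
  induction logs generalizing st with
  | nil => simp
  | cons l t ih =>
    rw [List.foldl_cons, ih, List.filter_cons]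
    by_cases h : pvIsReviewed l = true
    · simp [pvStep, pvCond_eq, h]
      omega
    · simp [pvStep, pvCond_eq, h]

-- a bump-fold's entry is the count of the value in the folded list
lemma getD_foldl_pvBump (xs : List (Option String)) (d : PySem.Dict (Option String) Int) (v : Option String) :
    (xs.foldl pvBump d).getD v 0 = d.getD v 0 + xs.count v := by
  simpa [pvBump] using PySem.Dict.getD_foldl_insert_add_one xs d v

lemma getD_foldl_pvBumpS (xs : List String) (d : PySem.Dict String Int) (v : String) :
    (xs.foldl pvBumpS d).getD v 0 = d.getD v 0 + xs.count v := by
  simpa [pvBumpS] using PySem.Dict.getD_foldl_insert_add_one xs d v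

-- A's 0/1 generator sum over a key function equals the count in the mapped list
lemma sum_ite_eq_count_map {α β : Type} [BEq β] [LawfulBEq β] (xs : List α) (g : α → β) (v : β) :
    (xs.map (fun x => if g x == v then (1 : Int) else 0)).sum = ((xs.map g).count v : Int) := by
  induction xs with
  | nil => simp
  | cons x t ih =>
    by_cases h : (g x == v) = true
    · simp [h, ih, List.count_cons]
      omega
    · simp [h, ih, List.count_cons]

-- ===== VERDICT (by name: the statement is the Claim_ definition above) =====
theorem calculate_review_counts_spec : Claim_equal_calculate_review_counts := by
  intro logs _ _
  show _ = _
  unfold calculate_review_counts calculate_review_counts_alt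
  rw [foldl_pvStep]
  simp only [getD_foldl_pvBump, getD_foldl_pvBumpS, PySem.Dict.getD_empty, pvCnt,
    zero_add]
  have hlen : (logs.filter (fun l => !pvIsReviewed l)).length
      = logs.length - (logs.filter pvIsReviewed).length := by
    have := List.length_eq_length_filter_add (l := logs) pvIsReviewed
    omega
  have hc : ∀ (f v : String),
      ((logs.filter pvIsReviewed).map (fun l => if pvGet l f == some v then (1 : Int) else 0)).sum
        = (((logs.filter pvIsReviewed).map (fun l => pvGet l f)).count (some v) : Int) := by
    intro f v
    simpa using sum_ite_eq_count_map (logs.filter pvIsReviewed) (fun l => pvGet l f) (some v)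
  have hi : ∀ (v : String),
      ((logs.filter pvIsReviewed).map (fun l => if (pvGet l "is_independent_question").getD "" == v then (1 : Int) else 0)).sum
        = (((logs.filter pvIsReviewed).map (fun l => (pvGet l "is_independent_question").getD "")).count v : Int) := by
    intro v
    simpa using sum_ite_eq_count_map (logs.filter pvIsReviewed)
      (fun l => (pvGet l "is_independent_question").getD "") v
  simp only [hc, hi, hlen, Nat.cast_sub (List.length_filter_le pvIsReviewed logs)]
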